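-- pv_equiv track=rewrite | github.com/thomaswantstobeaskeleton/BallonsTranslator-Pro | modules/textdetector/detector_hunyuan_ocr.py | _clean_repeated_substrings
-- ===== SOURCE A (Python) =====
-- def _clean_repeated_substrings(text: str) -> str:
--     n = len(text)
--     if n < 8000:
--         return text
--     for length in range(2, n // 10 + 1):
--         candidate = text[-length:]
--         count = 0
--         i = n - length
--         while i >= 0 and text[i : i + length] == candidate:
--             count += 1
--             i -= length
--         if count >= 10:
--             return text[: n - length * (count - 1)]
--     return text
-- ===== SOURCE B (Python) =====
-- def _clean_repeated_substrings(text: str) -> str: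
--     n = len(text)
--     if n < 8000:
--         return text
--     r = text[::-1]
--     for length in range(2, n // 10 + 1):
--         # longest self-overlap of the reversed text at shift `length`,
--         # obtained as the first mismatching position of the zipped pair stream
--         t = next((i for i, (a, b) in enumerate(zip(r, r[length:])) if a != b),
--                  n - length)
--         if t // length >= 9:
--             return text[: n - length * (t // length)]
--     return text
-- ===== Notes on version B (the rewrite author's own statement) =====
-- stated objective: alternative
-- what changed: B replaces A's block-by-block slice comparisons with an accumulating while-loop counter by a character-level first-mismatch search over the reversed text zipped with its own length-shifted copy, deriving the repeat count by integer division
import Mathlib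
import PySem

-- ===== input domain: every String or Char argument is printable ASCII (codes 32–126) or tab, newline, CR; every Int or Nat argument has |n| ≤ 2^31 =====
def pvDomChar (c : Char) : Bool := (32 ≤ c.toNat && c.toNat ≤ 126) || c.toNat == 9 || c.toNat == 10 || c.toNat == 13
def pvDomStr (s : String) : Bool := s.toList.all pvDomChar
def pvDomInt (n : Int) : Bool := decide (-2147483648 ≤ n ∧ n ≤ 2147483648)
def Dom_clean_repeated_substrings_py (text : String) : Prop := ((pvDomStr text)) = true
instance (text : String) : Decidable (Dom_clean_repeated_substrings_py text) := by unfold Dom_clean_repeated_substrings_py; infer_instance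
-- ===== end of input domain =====

-- B replaces A's block-by-block slice comparisons (with a while-loop block counter) by a
-- first-mismatch search over the reversed text zipped with its shifted copy; alternative
-- decomposition, similar cost.


-- ===== PORT A =====
-- while i >= 0 and text[i:i+length] == candidate: count += 1; i -= length
-- (the Nat argument is fuel that only makes the recursion structural; every call passes enough)
def pyWhileA (l : List Char) (L : Int) (cand : List Char) : Nat → Int → Int → Int
  | 0, _, count => count
  | fuel + 1, i, count =>
    if 0 ≤ i ∧ PySem.List.slice l (some i) (some (i + L)) = cand then
      pyWhileA l L cand fuel (i - L) (count + 1)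
    else count

-- for length in range(2, n // 10 + 1): …
def pyForA (l : List Char) (n : Int) : List Int → List Char
  | [] => l
  | L :: rest =>
    let cand := PySem.List.slice l (some (-L)) none
    let count := pyWhileA l L cand (l.length + 1) (n - L) 0
    if 10 ≤ count then PySem.List.slice l none (some (n - L * (count - 1)))
    else pyForA l n rest

def clean_repeated_substrings_py (text : String) : String :=
  let l := text.toList
  let n : Int := l.length
  if n < 8000 then text
  else String.ofList (pyForA l n (PySem.List.pyRange 2 (PySem.Int.floordiv n 10 + 1) 1))

-- ===== PORT B =====
-- t = next((i for i, (a, b) in enumerate(zip(r, r[length:])) if a != b), n - length)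
-- ported as findIdx? over the zipped list, with the default n - length
def pyForB (l r : List Char) (n : Int) : List Int → List Char
  | [] => l
  | L :: rest =>
    let t : Int := (((r.zip (PySem.List.slice r (some L) none)).findIdx?
        (fun p => !(p.1 == p.2))).map (fun i : Nat => (i : Int))).getD (n - L)
    if 9 ≤ PySem.Int.floordiv t L then
      PySem.List.slice l none (some (n - L * PySem.Int.floordiv t L))
    else pyForB l r n rest

def clean_repeated_substrings_py_alt (text : String) : String :=
  let l := text.toList
  let n : Int := l.length
  if n < 8000 then text
  else String.ofList (pyForB l l.reverse n (PySem.List.pyRange 2 (PySem.Int.floordiv n 10 + 1) 1))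

-- ===== PRECONDITION & SPEC =====
def Spec_clean_repeated_substrings_py (text : String) (out : String) : Prop := out = clean_repeated_substrings_py_alt text
instance (text : String) (out : String) : Decidable (Spec_clean_repeated_substrings_py text out) := by unfold Spec_clean_repeated_substrings_py; infer_instance

-- ===== CLAIM (what is proved, stated in full; the proofs are below) =====
def Claim_equal_clean_repeated_substrings_py : Prop := ∀ (text : String), Dom_clean_repeated_substrings_py text → Spec_clean_repeated_substrings_py text (clean_repeated_substrings_py text)

-- ===== LEMMAS AND PROOFS =====

lemma whileA_spec (l : List Char) (L : Int) (cand : List Char) (fuel : Nat) (i c : Int)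
    (hf : (i + 1).toNat < fuel) (hL : 2 ≤ L) :
    ∃ k : Nat, pyWhileA l L cand fuel i c = c + k ∧
      (∀ m : Nat, m < k → 0 ≤ i - m * L ∧
        PySem.List.slice l (some (i - m * L)) (some (i - m * L + L)) = cand) ∧
      ¬(0 ≤ i - k * L ∧
        PySem.List.slice l (some (i - k * L)) (some (i - k * L + L)) = cand) := by
  induction fuel generalizing i c with
  | zero => omega
  | succ fuel ih =>
    rw [pyWhileA]
    split
    · rename_i hc
      obtain ⟨k, hk1, hk2, hk3⟩ := ih (i - L) (c + 1) (by omega)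
      refine ⟨k + 1, by push_cast; omega, ?_, ?_⟩
      · intro m hm
        cases m with
        | zero => simpa using hc
        | succ s =>
          have := hk2 s (by omega)
          have harith : i - (s + 1 : Nat) * L = i - L - s * L := by push_cast; ring
          rw [harith]
          exact this
      · have harith : i - (k + 1 : Nat) * L = i - L - k * L := by push_cast; ring
        rw [harith]
        exact hk3
    · rename_i hc
      exact ⟨0, by omega, by omega, by simpa using hc⟩

lemma chunk_eq_iff (l : List Char) (a b Lp : Nat) :
    ((l.drop a).take Lp = (l.drop b).take Lp) ↔ ∀ p, p < Lp → l[a + p]? = l[b + p]? := by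
  constructor
  · intro h p hp
    have := congrArg (fun xs => xs[p]?) h
    simpa [List.getElem?_take, List.getElem?_drop, hp] using this
  · intro h
    apply List.ext_getElem?
    intro p
    by_cases hp : p < Lp
    · simpa [List.getElem?_take, List.getElem?_drop, hp] using h p hp
    · simp [List.getElem?_take, hp]

lemma chain (l : List Char) (Lp k : Nat) (hL : 0 < Lp) (hk : (k + 1) * Lp ≤ l.length)
    (hp : ∀ j, j < k * Lp → l[l.length - 1 - Lp - j]? = l[l.length - 1 - j]?) :
    ∀ m, m ≤ k → ∀ p, p < Lp → l[l.length - (m + 1) * Lp + p]? = l[l.length - Lp + p]? := by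
  intro m
  induction m with
  | zero => intro _ p hp'; norm_num
  | succ s ih =>
    intro hs p hp'
    have e1 : (s + 1) * Lp = s * Lp + Lp := by ring
    have e2 : (s + 2) * Lp = s * Lp + 2 * Lp := by ring
    have ek : (k + 1) * Lp = k * Lp + Lp := by ring
    have hmono : (s + 1) * Lp ≤ k * Lp := mul_le_mul_right' (by omega) Lp
    have hmono2 : (s + 2) * Lp ≤ (k + 1) * Lp := mul_le_mul_right' (by omega) Lp
    have h1 : l[l.length - (s + 2) * Lp + p]? = l[l.length - (s + 1) * Lp + p]? := by
      have hj := hp ((s + 1) * Lp - p - 1) (by omega)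
      have i1 : l.length - 1 - Lp - ((s + 1) * Lp - p - 1) = l.length - (s + 2) * Lp + p := by omega
      have i2 : l.length - 1 - ((s + 1) * Lp - p - 1) = l.length - (s + 1) * Lp + p := by omega
      rw [i1, i2] at hj
      exact hj
    have e3 : s + 1 + 1 = s + 2 := by omega
    rw [e3, h1]
    exact ih (by omega) p hp'

lemma pairs_of_blocks (l : List Char) (Lp k : Nat) (hL : 0 < Lp) (hk : (k + 1) * Lp ≤ l.length)
    (hb : ∀ m, m ≤ k → ∀ p, p < Lp → l[l.length - (m + 1) * Lp + p]? = l[l.length - Lp + p]?) :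
    ∀ j, j < k * Lp → l[l.length - 1 - Lp - j]? = l[l.length - 1 - j]? := by
  intro j hj
  obtain ⟨m, s, hs, rfl⟩ : ∃ m s, s < Lp ∧ j = m * Lp + s :=
    ⟨j / Lp, j % Lp, Nat.mod_lt _ hL, (Nat.div_add_mod j Lp).symm.trans (by ring)⟩
  have hm : m + 1 ≤ k := by
    by_contra h
    have : k * Lp ≤ m * Lp := mul_le_mul_right' (by omega) Lp
    omega
  have e1 : (m + 1) * Lp = m * Lp + Lp := by ring
  have e2 : (m + 2) * Lp = m * Lp + 2 * Lp := by ring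
  have ek : (k + 1) * Lp = k * Lp + Lp := by ring
  have hmono2 : (m + 2) * Lp ≤ (k + 1) * Lp := mul_le_mul_right' (by omega) Lp
  have h1 := hb (m + 1) hm (Lp - 1 - s) (by omega)
  have h2 := hb m (by omega) (Lp - 1 - s) (by omega)
  have e3 : m + 1 + 1 = m + 2 := by omega
  rw [e3] at h1
  have i1 : l.length - 1 - Lp - (m * Lp + s) = l.length - (m + 2) * Lp + (Lp - 1 - s) := by omega
  have i2 : l.length - 1 - (m * Lp + s) = l.length - (m + 1) * Lp + (Lp - 1 - s) := by omega
  rw [i1, i2, h1, h2]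

-- A's while-loop counter, characterised by the length Tn of the matching self-overlap prefix
lemma count_from_T (l : List Char) (Lp Tn : Nat) (hLp2 : 2 ≤ Lp) (h10N : 10 * Lp ≤ l.length)
    (hTnle : Tn ≤ l.length - Lp)
    (hpairsN : ∀ j, j < Tn → l[l.length - 1 - Lp - j]? = l[l.length - 1 - j]?)
    (hmaxN : Tn = l.length - Lp ∨ l[l.length - 1 - Lp - Tn]? ≠ l[l.length - 1 - Tn]?) :
    pyWhileA l (Lp : Int) (PySem.List.slice l (some (-(Lp : Int))) none) (l.length + 1)
      ((l.length : Int) - Lp) 0 = ((Tn / Lp : Nat) : Int) + 1 := by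
  have hcand : PySem.List.slice l (some (-(Lp:Int))) none = l.drop (l.length - Lp) :=
    PySem.List.slice_from_neg_natCast l Lp (by omega)
  have hcand_take : (l.drop (l.length - Lp)).take Lp = l.drop (l.length - Lp) :=
    List.take_of_length_le (by simp; omega)
  have hblock : ∀ mm : Nat, (mm + 1) * Lp ≤ l.length →
      (PySem.List.slice l (some (((l.length : Int) - (Lp:Int)) - (mm:Int) * (Lp:Int)))
          (some (((l.length : Int) - (Lp:Int)) - (mm:Int) * (Lp:Int) + (Lp:Int))) = l.drop (l.length - Lp)
       ↔ ∀ p, p < Lp → l[(l.length - (mm + 1) * Lp) + p]? = l[(l.length - Lp) + p]?) := by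
    intro mm hmm
    obtain ⟨j, hj⟩ : ∃ j : Nat, l.length = j + (mm + 1) * Lp := ⟨l.length - (mm+1)*Lp, by omega⟩
    have e : ((l.length : Int) - (Lp:Int)) - (mm:Int) * (Lp:Int) = ((j : Nat) : Int) := by
      rw [hj]; push_cast; ring
    have ej : l.length - (mm + 1) * Lp = j := by omega
    rw [e, ej, PySem.List.slice_natCast_add, ← hcand_take, chunk_eq_iff]
  obtain ⟨k, hK, hblocks, hfail⟩ :=
    whileA_spec l (Lp:Int) (PySem.List.slice l (some (-(Lp:Int))) none) (l.length + 1)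
      ((l.length : Int) - (Lp:Int)) 0 (by omega) (by exact_mod_cast hLp2)
  rw [hcand] at hblocks hfail
  have hblocksN : ∀ m : Nat, m < k → (m + 1) * Lp ≤ l.length ∧
      ∀ p, p < Lp → l[(l.length - (m + 1) * Lp) + p]? = l[(l.length - Lp) + p]? := by
    intro m hm
    obtain ⟨hge, heq⟩ := hblocks m hm
    have ec : (((m + 1) * Lp : Nat) : Int) = (m:Int) * (Lp:Int) + (Lp:Int) := by push_cast; ring
    have hle : (m + 1) * Lp ≤ l.length := by omega
    exact ⟨hle, (hblock m hle).mp heq⟩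
  have hk1 : 1 ≤ k := by
    by_contra h
    have hk0 : k = 0 := by omega
    subst hk0
    apply hfail
    constructor
    · push_cast; omega
    · have hb0 : ∀ p, p < Lp → l[l.length - (0 + 1) * Lp + p]? = l[l.length - Lp + p]? := by
        intro p hp; norm_num
      exact (hblock 0 (by omega)).mpr hb0
  have hclaim1 : (k - 1) * Lp ≤ Tn := by
    by_contra h
    push_neg at h
    have ek : (k - 1 + 1) = k := by omega
    have hkN : k * Lp ≤ l.length := by
      have := (hblocksN (k-1) (by omega)).1
      rw [ek] at this; exact this
    have hball : ∀ m, m ≤ k - 1 → ∀ p, p < Lp → l[l.length - (m + 1) * Lp + p]? = l[l.length - Lp + p]? :=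
      fun m hm => (hblocksN m (by omega)).2
    have hpairs2 := pairs_of_blocks l Lp (k-1) (by omega) (by rw [ek]; exact hkN) hball
    have e2 : (k - 1) * Lp + Lp = k * Lp := by
      calc (k - 1) * Lp + Lp = (k - 1 + 1) * Lp := by ring
      _ = k * Lp := by rw [ek]
    rcases hmaxN with heq | hne
    · omega
    · exact hne (hpairs2 Tn h)
  have hclaim2 : Tn / Lp ≤ k - 1 := by
    have hqLp : (Tn / Lp) * Lp ≤ Tn := Nat.div_mul_le_self _ _
    have eq1 : (Tn / Lp + 1) * Lp = (Tn / Lp) * Lp + Lp := by ring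
    have hqN : (Tn / Lp + 1) * Lp ≤ l.length := by omega
    have hchain := chain l Lp (Tn / Lp) (by omega) hqN (fun j hj => hpairsN j (by omega))
    by_contra h
    push_neg at h
    have hkq : k ≤ Tn / Lp := by omega
    apply hfail
    have hkle : (k + 1) * Lp ≤ l.length := le_trans (mul_le_mul_right' (by omega) Lp) hqN
    constructor
    · have ec : (((k+1) * Lp : Nat) : Int) = (k:Int) * (Lp:Int) + (Lp:Int) := by push_cast; ring
      omega
    · exact (hblock k hkle).mpr (hchain k hkq)
  have hkq : k = Tn / Lp + 1 := by
    have : k - 1 ≤ Tn / Lp := (Nat.le_div_iff_mul_le (by omega)).mpr hclaim1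
    omega
  rw [hK, hkq]
  push_cast
  ring

-- B's first-mismatch index over the zipped reversed text equals A's while-loop count (shifted)
lemma step_eq (l : List Char) (n : Int) (hn : n = l.length) (L : Int) (hL : 2 ≤ L) (h10 : 10 * L ≤ n) :
    pyWhileA l L (PySem.List.slice l (some (-L)) none) (l.length + 1) (n - L) 0 =
      PySem.Int.floordiv ((((l.reverse.zip (PySem.List.slice l.reverse (some L) none)).findIdx?
          (fun p => !(p.1 == p.2))).map (fun i : Nat => (i : Int))).getD (n - L)) L + 1 := by
  obtain ⟨Lp, rfl⟩ : ∃ Lp : Nat, L = (Lp : Int) := ⟨L.toNat, (Int.toNat_of_nonneg (by omega)).symm⟩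
  have hLp2 : 2 ≤ Lp := by exact_mod_cast hL
  have h10N : 10 * Lp ≤ l.length := by
    have : (10 : Int) * Lp ≤ (l.length : Int) := by rw [← hn]; exact_mod_cast h10
    exact_mod_cast this
  rw [PySem.List.slice_from_natCast]
  have hplen : (l.reverse.zip (l.reverse.drop Lp)).length = l.length - Lp := by
    simp [List.length_zip]
  -- a matching pair j gives the Nat-index equation the block lemmas use
  have hmatch : ∀ (j : Nat) (hjj : j < (l.reverse.zip (l.reverse.drop Lp)).length),
      ((l.reverse.zip (l.reverse.drop Lp))[j]'hjj).1 =
        ((l.reverse.zip (l.reverse.drop Lp))[j]'hjj).2 →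
      l[l.length - 1 - Lp - j]? = l[l.length - 1 - j]? := by
    intro j hjj he
    have hj : j < l.length - Lp := by rw [hplen] at hjj; exact hjj
    have hz : (l.reverse.zip (l.reverse.drop Lp))[j]'hjj =
        (l.reverse[j]'(by simp; omega), (l.reverse.drop Lp)[j]'(by simp; omega)) :=
      List.getElem_zip
    have hd : (l.reverse.drop Lp)[j]'(by simp; omega) = l.reverse[Lp + j]'(by simp; omega) :=
      List.getElem_drop ..
    rw [hz, hd] at he
    simp only [] at he
    have he' : l.reverse[j]'(by simp; omega) = l.reverse[Lp + j]'(by simp; omega) := he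
    have h1 : l.reverse[j]? = l[l.length - 1 - j]? := List.getElem?_reverse (by omega)
    have h2 : l.reverse[Lp + j]? = l[l.length - 1 - (Lp + j)]? := List.getElem?_reverse (by omega)
    have e : l.length - 1 - (Lp + j) = l.length - 1 - Lp - j := by omega
    rw [e] at h2
    rw [← h1, ← h2, List.getElem?_eq_getElem (by simp; omega),
        List.getElem?_eq_getElem (by simp; omega)]
    exact congrArg some he'.symm
  have hmis : ∀ (j : Nat) (hjj : j < (l.reverse.zip (l.reverse.drop Lp)).length),
      ((l.reverse.zip (l.reverse.drop Lp))[j]'hjj).1 ≠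
        ((l.reverse.zip (l.reverse.drop Lp))[j]'hjj).2 →
      l[l.length - 1 - Lp - j]? ≠ l[l.length - 1 - j]? := by
    intro j hjj he
    have hj : j < l.length - Lp := by rw [hplen] at hjj; exact hjj
    have hz : (l.reverse.zip (l.reverse.drop Lp))[j]'hjj =
        (l.reverse[j]'(by simp; omega), (l.reverse.drop Lp)[j]'(by simp; omega)) :=
      List.getElem_zip
    have hd : (l.reverse.drop Lp)[j]'(by simp; omega) = l.reverse[Lp + j]'(by simp; omega) :=
      List.getElem_drop ..
    rw [hz, hd] at he
    simp only [] at he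
    have he' : l.reverse[j]'(by simp; omega) ≠ l.reverse[Lp + j]'(by simp; omega) := he
    have h1 : l.reverse[j]? = l[l.length - 1 - j]? := List.getElem?_reverse (by omega)
    have h2 : l.reverse[Lp + j]? = l[l.length - 1 - (Lp + j)]? := List.getElem?_reverse (by omega)
    have e : l.length - 1 - (Lp + j) = l.length - 1 - Lp - j := by omega
    rw [e] at h2
    rw [← h1, ← h2, List.getElem?_eq_getElem (by simp; omega),
        List.getElem?_eq_getElem (by simp; omega)]
    simp only [ne_eq, Option.some.injEq]
    exact fun hcc => he' hcc.symm
  have ht : (l.length : Int) - (Lp:Int) = ((l.length - Lp : Nat) : Int) := by push_cast; omega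
  rcases hfi : (l.reverse.zip (l.reverse.drop Lp)).findIdx? (fun p => !(p.1 == p.2)) with _ | i
  · -- no mismatch: every pair matches, Tn = l.length - Lp
    have hall := List.findIdx?_eq_none_iff.mp hfi
    have hcount := count_from_T l Lp (l.length - Lp) hLp2 h10N le_rfl ?_ (Or.inl rfl)
    · rw [hn, hcount, hfi, Option.map_none, Option.getD_none, ht, PySem.Int.floordiv_natCast]
    · intro j hj
      apply hmatch j (by rw [hplen]; omega)
      have := hall _ (List.getElem_mem (by rw [hplen]; omega))
      simpa using this
  · -- first mismatch at i
    obtain ⟨hilt, hpi, hprev⟩ := List.findIdx?_eq_some_iff_getElem.mp hfi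
    rw [hplen] at hilt
    have hcount := count_from_T l Lp i hLp2 h10N (by omega) ?_ ?_
    · rw [hn, hcount, hfi, Option.map_some, Option.getD_some, PySem.Int.floordiv_natCast]
    · intro j hj
      apply hmatch j (by rw [hplen]; omega)
      have := hprev j hj
      simpa using this
    · refine Or.inr (hmis i (by rw [hplen]; omega) ?_)
      simpa using hpi

lemma forAB_eq (l : List Char) (n : Int) (hn : n = l.length) (lens : List Int)
    (hmem : ∀ L ∈ lens, 2 ≤ L ∧ 10 * L ≤ n) :
    pyForA l n lens = pyForB l l.reverse n lens := by
  induction lens with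
  | nil => rfl
  | cons L rest ih =>
    obtain ⟨h2, h10⟩ := hmem L List.mem_cons_self
    have hstep := step_eq l n hn L h2 h10
    rw [pyForA, pyForB]
    rw [hstep]
    set t : Int := (((l.reverse.zip (PySem.List.slice l.reverse (some L) none)).findIdx?
        (fun p => !(p.1 == p.2))).map (fun i : Nat => (i : Int))).getD (n - L) with htdef
    by_cases hq : 9 ≤ PySem.Int.floordiv t L
    · rw [if_pos (show (10:Int) ≤ PySem.Int.floordiv t L + 1 by omega), if_pos hq,
          (by ring : PySem.Int.floordiv t L + 1 - 1 = PySem.Int.floordiv t L)]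
    · rw [if_neg (show ¬ (10:Int) ≤ PySem.Int.floordiv t L + 1 by omega), if_neg hq]
      exact ih (fun L' h => hmem L' (List.mem_cons_of_mem _ h))

-- ===== VERDICT (by name: the statement is the Claim_ definition above) =====
theorem clean_repeated_substrings_py_spec : Claim_equal_clean_repeated_substrings_py := by
  intro text _
  unfold Spec_clean_repeated_substrings_py clean_repeated_substrings_py clean_repeated_substrings_py_alt
  simp only
  split
  · rfl
  · rename_i h
    refine congrArg String.ofList (forAB_eq _ _ rfl _ ?_)
    intro L hLmem
    rw [PySem.List.mem_pyRange_one] at hLmem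
    have h2 : (2:Int) ≤ L := hLmem.1
    have hlt : L < PySem.Int.floordiv (text.toList.length : Int) 10 + 1 := hLmem.2
    have : L ≤ PySem.Int.floordiv (text.toList.length : Int) 10 := by omega
    rw [PySem.Int.le_floordiv_iff_mul_le (by norm_num)] at this
    exact ⟨h2, by linarith⟩
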